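-- pv_equiv track=rewrite | github.com/phun9h13u4nh/test | tool.py | get_safe_positions
-- ===== SOURCE A (Python) =====
-- def get_safe_positions(mypos,enemy_positions):
--     def pos_to_matrix(enpos,mypos):
--         tru = int(mypos) - int(enpos)
--         if tru ==1:pos_enermy =(1,0)
--         elif tru==-1:pos_enermy=(1,2)
--         elif tru ==120:pos_enermy=(0,1)
--         elif tru ==-120:pos_enermy=(2,1)
--         elif tru ==121:pos_enermy=(0,0)
--         elif tru ==119:pos_enermy=(0,2)
--         elif tru ==-121:pos_enermy=(2,2)
--         elif tru==-119:pos_enermy =(2,0)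
--         else:pos_enermy=None
--         return pos_enermy
--
--     def matrix_to_pos(matrix_pos, mypos):
--         matrix_positions = {
--             (1, 0): 1,
--             (1, 2): -1,
--             (0, 1): 120,
--             (2, 1): -120,
--             (0, 0): 121,
--             (0, 2): 119,
--             (2, 2): -121,
--             (2, 0): -119
--         }
--         delta = matrix_positions.get(matrix_pos)
--         if delta is not None:
--             return mypos - delta
--         return None  # Trả về None nếu không tìm thấy kết quả phù hợp
--     # Tính toán phạm vi tấn công của tất cả kẻ địch (vùng 3x3)
--     my_position=(1,1)
--     enemy_positions = list(pos_to_matrix(enpos=pos,mypos=mypos) for pos in enemy_positions)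
--     enemy_attack_range = set()
--     for enemy_position in enemy_positions:
--         for i in range(-1, 2):
--             for j in range(-1, 2):
--                 enemy_attack_range.add((enemy_position[0] + i, enemy_position[1] + j))
--
--     # Tạo danh sách các vị trí an toàn (không nằm trong phạm vi tấn công của kẻ địch)
--     safe_positions = []
--     for i in range(3):
--         for j in range(3):
--             position = (my_position[0] - 1 + i, my_position[1] - 1 + j)
--             if position not in enemy_attack_range:
--                 safe_positions.append(position)
--     safe_positions = list(matrix_to_pos(matrix_pos=pos,mypos=mypos) for pos in safe_positions)
--     return safe_positions
-- ===== SOURCE B (Python) =====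
-- def get_safe_positions(mypos, enemy_positions):
--     def pos_to_matrix(enpos, mypos):
--         tru = int(mypos) - int(enpos)
--         if tru == 1: pos_enermy = (1, 0)
--         elif tru == -1: pos_enermy = (1, 2)
--         elif tru == 120: pos_enermy = (0, 1)
--         elif tru == -120: pos_enermy = (2, 1)
--         elif tru == 121: pos_enermy = (0, 0)
--         elif tru == 119: pos_enermy = (0, 2)
--         elif tru == -121: pos_enermy = (2, 2)
--         elif tru == -119: pos_enermy = (2, 0)
--         else: pos_enermy = None
--         return pos_enermy
--
--     def matrix_to_pos(matrix_pos, mypos):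
--         matrix_positions = {
--             (1, 0): 1,
--             (1, 2): -1,
--             (0, 1): 120,
--             (2, 1): -120,
--             (0, 0): 121,
--             (0, 2): 119,
--             (2, 2): -121,
--             (2, 0): -119
--         }
--         delta = matrix_positions.get(matrix_pos)
--         if delta is not None:
--             return mypos - delta
--         return None
--
--     enemies = [pos_to_matrix(enpos=pos, mypos=mypos) for pos in enemy_positions]
--     safe_positions = []
--     for i in range(3):
--         for j in range(3):
--             if not any(abs(i - e[0]) <= 1 and abs(j - e[1]) <= 1 for e in enemies):
--                 safe_positions.append(matrix_to_pos((i, j), mypos))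
--     return safe_positions
-- ===== Notes on version B (the rewrite author's own statement) =====
-- stated objective: simpler
-- what changed: Replaces the maintained attack-range set (a triple loop adding 9 cells per enemy, then a membership filter) with a direct per-cell scan that tests each of the 9 grid cells against the enemy cells by Chebyshev distance <= 1, keeping the helper conversions unchanged.
import Mathlib
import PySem

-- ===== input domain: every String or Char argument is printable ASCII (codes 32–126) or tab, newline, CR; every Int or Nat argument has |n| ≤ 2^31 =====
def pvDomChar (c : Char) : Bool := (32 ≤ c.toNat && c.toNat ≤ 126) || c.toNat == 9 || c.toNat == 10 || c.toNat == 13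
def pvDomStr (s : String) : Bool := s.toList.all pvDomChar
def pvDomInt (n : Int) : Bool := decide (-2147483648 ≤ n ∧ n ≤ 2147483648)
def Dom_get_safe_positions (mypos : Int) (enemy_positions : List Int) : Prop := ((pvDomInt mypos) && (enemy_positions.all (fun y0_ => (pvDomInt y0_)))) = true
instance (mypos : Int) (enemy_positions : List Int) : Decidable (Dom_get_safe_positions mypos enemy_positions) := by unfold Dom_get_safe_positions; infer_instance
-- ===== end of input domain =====

-- B replaces A's maintained attack-range set with a direct per-cell Chebyshev-distance scan (objective: simpler).
-- The helpers pos_to_matrix / matrix_to_pos are identical in both Pythons and are shared here.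

-- ===== PORT A =====
-- helper pos_to_matrix (shared by A and B, identical code in both Pythons); None -> none
def pvPosToMatrix (enpos : Int) (mypos : Int) : Option (Int × Int) :=
  let tru := mypos - enpos
  if tru = 1 then some (1, 0)
  else if tru = -1 then some (1, 2)
  else if tru = 120 then some (0, 1)
  else if tru = -120 then some (2, 1)
  else if tru = 121 then some (0, 0)
  else if tru = 119 then some (0, 2)
  else if tru = -121 then some (2, 2)
  else if tru = -119 then some (2, 0)
  else none

-- helper matrix_to_pos (shared by A and B, identical code in both Pythons)
def pvMatrixToPos (matrix_pos : Int × Int) (mypos : Int) : Option Int :=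
  let matrix_positions : PySem.Dict (Int × Int) Int :=
    ((((((((PySem.Dict.empty.insert (1, 0) 1).insert (1, 2) (-1)).insert (0, 1) 120).insert
      (2, 1) (-120)).insert (0, 0) 121).insert (0, 2) 119).insert (2, 2) (-121)).insert (2, 0) (-119))
  match matrix_positions.get? matrix_pos with
  | some delta => some (mypos - delta)
  | none => none

-- Python A dereferences enemy_position[0] which raises TypeError when pos_to_matrix gave None;
-- those inputs are excluded by Pre_; the '.getD (0,0)' below is an arbitrary total-ization outside Pre_.
def get_safe_positions (mypos : Int) (enemy_positions : List Int) : List (Option Int) :=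
  let my_position : Int × Int := (1, 1)
  let enemies := enemy_positions.map (fun pos => pvPosToMatrix pos mypos)
  let enemy_attack_range : PySem.Set (Int × Int) :=
    enemies.foldl (fun s enemy_position =>
      (PySem.List.pyRange (-1) 2 1).foldl (fun s i =>
        (PySem.List.pyRange (-1) 2 1).foldl (fun s j =>
          PySem.Set.add s ((enemy_position.getD (0, 0)).1 + i, (enemy_position.getD (0, 0)).2 + j)) s) s)
      PySem.Set.empty
  let safe_positions :=
    (PySem.List.pyRange 0 3 1).foldl (fun acc i =>
      (PySem.List.pyRange 0 3 1).foldl (fun acc j =>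
        let position := (my_position.1 - 1 + i, my_position.2 - 1 + j)
        if PySem.Set.contains enemy_attack_range position then acc else acc ++ [position]) acc) []
  safe_positions.map (fun pos => pvMatrixToPos pos mypos)

-- ===== PORT B =====
def get_safe_positions_alt (mypos : Int) (enemy_positions : List Int) : List (Option Int) :=
  let enemies := enemy_positions.map (fun pos => pvPosToMatrix pos mypos)
  (PySem.List.pyRange 0 3 1).foldl (fun acc i =>
    (PySem.List.pyRange 0 3 1).foldl (fun acc j =>
      if enemies.any (fun e? =>
          let e := e?.getD (0, 0)
          decide ((i - e.1).natAbs ≤ 1) && decide ((j - e.2).natAbs ≤ 1))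
      then acc
      else acc ++ [pvMatrixToPos (i, j) mypos]) acc) []

-- ===== PRECONDITION & SPEC =====
-- Pre_ excludes exactly the inputs where Python A raises TypeError: an enemy whose offset from
-- mypos is not one of the 8 adjacency deltas makes pos_to_matrix return None, and A then indexes None.
def Pre_get_safe_positions (mypos : Int) (enemy_positions : List Int) : Prop :=
  ∀ e ∈ enemy_positions, mypos - e ∈ ([1, -1, 120, -120, 121, 119, -121, -119] : List Int)
instance (mypos : Int) (enemy_positions : List Int) : Decidable (Pre_get_safe_positions mypos enemy_positions) := by unfold Pre_get_safe_positions; infer_instance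

def pvWitness_get_safe_positions : Int × List Int := (200, [201, 80])

def Spec_get_safe_positions (mypos : Int) (enemy_positions : List Int) (out : List (Option Int)) : Prop := out = get_safe_positions_alt mypos enemy_positions
instance (mypos : Int) (enemy_positions : List Int) (out : List (Option Int)) : Decidable (Spec_get_safe_positions mypos enemy_positions out) := by unfold Spec_get_safe_positions; infer_instance

-- ===== CLAIM (what is proved, stated in full; the proofs are below) =====
def Claim_equal_get_safe_positions : Prop := ∀ (mypos : Int) (enemy_positions : List Int), Dom_get_safe_positions mypos enemy_positions → Pre_get_safe_positions mypos enemy_positions → Spec_get_safe_positions mypos enemy_positions (get_safe_positions mypos enemy_positions)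

-- ===== LEMMAS AND PROOFS =====

-- proof-side abbreviations (used only below the claim block)
def pvCells9 : List (Int × Int) := [(0,0),(0,1),(0,2),(1,0),(1,1),(1,2),(2,0),(2,1),(2,2)]

def pvAttackOf (mypos : Int) (enemy_positions : List Int) : PySem.Set (Int × Int) :=
  (enemy_positions.map (fun pos => pvPosToMatrix pos mypos)).foldl (fun s e? =>
    (PySem.List.pyRange (-1) 2 1).foldl (fun s i =>
      (PySem.List.pyRange (-1) 2 1).foldl (fun s j =>
        PySem.Set.add s ((e?.getD (0, 0)).1 + i, (e?.getD (0, 0)).2 + j)) s) s)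
    PySem.Set.empty

def pvNear (mypos : Int) (enemy_positions : List Int) (p : Int × Int) : Bool :=
  (enemy_positions.map (fun pos => pvPosToMatrix pos mypos)).any (fun e? =>
    let e := e?.getD (0, 0)
    decide ((p.1 - e.1).natAbs ≤ 1) && decide ((p.2 - e.2).natAbs ≤ 1))

-- A's inner double loop: adding the 9 cells around e to s; membership characterisation.
lemma pv_mem_add9 (s : PySem.Set (Int × Int)) (e p : Int × Int) :
    p ∈ ((PySem.List.pyRange (-1) 2 1).foldl (fun s i =>
        (PySem.List.pyRange (-1) 2 1).foldl (fun s j =>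
          PySem.Set.add s (e.1 + i, e.2 + j)) s) s)
    ↔ p ∈ s ∨ ((p.1 - e.1).natAbs ≤ 1 ∧ (p.2 - e.2).natAbs ≤ 1) := by
  have h : PySem.List.pyRange (-1) 2 1 = [-1, 0, 1] := by decide
  obtain ⟨p1, p2⟩ := p
  by_cases hs : (p1, p2) ∈ s
  · simp [h, PySem.Set.mem_add, hs]
  · simp only [h, List.foldl_cons, List.foldl_nil, PySem.Set.mem_add, Prod.mk.injEq, hs,
      false_or]
    omega

-- A's attack-range set: membership equals B's any-scan condition, generalized over the initial set.
lemma pv_mem_attack_aux (es : List (Option (Int × Int))) (s : PySem.Set (Int × Int)) (p : Int × Int) :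
    p ∈ (es.foldl (fun s e? =>
        (PySem.List.pyRange (-1) 2 1).foldl (fun s i =>
          (PySem.List.pyRange (-1) 2 1).foldl (fun s j =>
            PySem.Set.add s ((e?.getD (0, 0)).1 + i, (e?.getD (0, 0)).2 + j)) s) s) s)
    ↔ p ∈ s ∨ ∃ e? ∈ es, ((p.1 - (e?.getD (0, 0)).1).natAbs ≤ 1 ∧ (p.2 - (e?.getD (0, 0)).2).natAbs ≤ 1) := by
  induction es generalizing s with
  | nil => simp
  | cons e es ih =>
    simp only [List.foldl_cons, ih, pv_mem_add9, List.mem_cons]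
    constructor
    · rintro ((hs | hc) | ⟨x, hx, hc⟩)
      · exact Or.inl hs
      · exact Or.inr ⟨e, Or.inl rfl, hc⟩
      · exact Or.inr ⟨x, Or.inr hx, hc⟩
    · rintro (hs | ⟨x, (rfl | hx), hc⟩)
      · exact Or.inl (Or.inl hs)
      · exact Or.inl (Or.inr hc)
      · exact Or.inr ⟨x, hx, hc⟩

-- A's per-cell condition (cell in the attack set) equals B's (some enemy within Chebyshev distance 1).
lemma pv_cond_eq (mypos : Int) (enemy_positions : List Int) (p : Int × Int) :
    PySem.Set.contains (pvAttackOf mypos enemy_positions) p = pvNear mypos enemy_positions p := by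
  rcases h : pvNear mypos enemy_positions p with _ | _
  · rw [Bool.eq_false_iff]
    intro hc
    rw [PySem.Set.contains_iff, pvAttackOf, pv_mem_attack_aux] at hc
    rcases hc with hc | ⟨x, hx, h1, h2⟩
    · simp [PySem.Set.empty] at hc
    · rw [Bool.eq_false_iff] at h
      exact h (by
        simp only [pvNear, List.any_eq_true]
        exact ⟨x, hx, by simp [h1, h2]⟩)
  · simp only [pvNear, List.any_eq_true, Bool.and_eq_true, decide_eq_true_eq] at h
    obtain ⟨x, hx, hc⟩ := h
    rw [PySem.Set.contains_iff, pvAttackOf, pv_mem_attack_aux]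
    exact Or.inr ⟨x, hx, hc⟩

-- A's result, reshaped as a single fold over the 9 cells (definitional unfolding of the ranges).
lemma pv_A_shape (mypos : Int) (enemy_positions : List Int) :
    get_safe_positions mypos enemy_positions
    = (pvCells9.foldl (fun a c =>
        if PySem.Set.contains (pvAttackOf mypos enemy_positions) c then a else a ++ [c]) []).map
        (fun pos => pvMatrixToPos pos mypos) := by
  rfl

-- B's result, reshaped as a single fold over the 9 cells.
lemma pv_B_shape (mypos : Int) (enemy_positions : List Int) :
    get_safe_positions_alt mypos enemy_positions
    = pvCells9.foldl (fun a c =>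
        if pvNear mypos enemy_positions c then a else a ++ [pvMatrixToPos c mypos]) [] := by
  rfl

-- filter-then-map (A's shape) equals map-while-filtering (B's shape), for a generic fold.
lemma pv_map_fold (cs : List (Int × Int)) (cond : Int × Int → Bool) (f : Int × Int → Option Int)
    (acc : List (Int × Int)) :
    (cs.foldl (fun a c => if cond c then a else a ++ [c]) acc).map f
    = cs.foldl (fun a c => if cond c then a else a ++ [f c]) (acc.map f) := by
  induction cs generalizing acc with
  | nil => rfl
  | cons c cs ih =>
    simp only [List.foldl_cons]
    rcases h : cond c with _ | _
    · simp only [Bool.false_eq_true, if_false, List.map_append, List.map_cons, List.map_nil, ih]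
    · simp only [if_true, ih]

theorem get_safe_positions_theorem (mypos : Int) (enemy_positions : List Int) :
    get_safe_positions mypos enemy_positions = get_safe_positions_alt mypos enemy_positions := by
  rw [pv_A_shape, pv_B_shape, pv_map_fold]
  simp only [pv_cond_eq, List.map_nil]

-- ===== VERDICT (by name: the statement is the Claim_ definition above) =====
theorem get_safe_positions_spec : Claim_equal_get_safe_positions := by
  intro mypos enemy_positions _ _
  unfold Spec_get_safe_positions
  exact get_safe_positions_theorem mypos enemy_positions
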